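-- pv_equiv track=rewrite | github.com/Ganesh33331c/Nexus-Proactive_DevSecOps_AI_Agent | app.py | map_results_to_html
-- ===== SOURCE A (Python) =====
-- HTML_TEMPLATE = """
-- <!DOCTYPE html>
-- <html lang="en">
-- <head>
--     <script src="https://cdn.tailwindcss.com"></script>
--     <style>
--         body {{ background-color: #0f172a; color: #cbd5e1; font-family: sans-serif; }}
--         .glass {{ background: rgba(30, 41, 59, 0.7); border: 1px solid rgba(255,255,255,0.1); }}
--         .sev-critical {{ border-left: 4px solid #ef4444; }}
--         .sev-high {{ border-left: 4px solid #f97316; }}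
--         .hidden {{ display: none; }}
--     </style>
--     <script>
--         function filterSev(level) {{
--             document.querySelectorAll('.f-card').forEach(c => {{
--                 c.classList.toggle('hidden', level !== 'all' && c.dataset.sev !== level);
--             }});
--         }}
--     </script>
-- </head>
-- <body class="p-8"><div class="max-w-5xl mx-auto">
--     <h1 class="text-3xl font-bold text-white mb-8">NEXUS <span class="text-blue-500">AUDIT</span></h1>
--
--     <div class="flex gap-2 mb-8">
--         <button onclick="filterSev('all')" class="px-4 py-2 bg-slate-800 text-white rounded">ALL</button>
--         <button onclick="filterSev('critical')" class="px-4 py-2 bg-red-900/50 text-red-400 rounded">CRITICAL</button>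
--     </div>
--
--     <div class="grid grid-cols-4 gap-4 mb-8">
--         <div class="glass p-4 rounded text-center"><div class="text-red-500 text-xs">CRITICAL</div><div class="text-2xl font-bold text-white">{c_crit}</div></div>
--         <div class="glass p-4 rounded text-center"><div class="text-orange-500 text-xs">HIGH</div><div class="text-2xl font-bold text-white">{c_high}</div></div>
--         <div class="glass p-4 rounded text-center"><div class="text-yellow-500 text-xs">MEDIUM</div><div class="text-2xl font-bold text-white">{c_med}</div></div>
--         <div class="glass p-4 rounded text-center"><div class="text-emerald-500 text-xs">LOW</div><div class="text-2xl font-bold text-white">{c_low}</div></div>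
--     </div>
--     <div class="space-y-4">{detailed_findings}</div>
-- </div></body></html>
-- """
--
-- def map_results_to_html(scan_data):
--     findings = scan_data.get("findings", [])
--     counts = {s: sum(1 for f in findings if f.get('severity', '').lower() == s) for s in ['critical', 'high', 'medium', 'low']}
--
--     cards_html = ""
--     for f in findings:
--         sev = f.get('severity', 'low').lower()
--         cards_html += f"""
--         <div class="f-card glass p-6 rounded sev-{sev} mb-4" data-sev="{sev}">
--             <h3 class="text-lg font-bold text-white mb-2">{f.get('title', 'Unknown')} <span class="text-xs bg-slate-800 p-1 rounded uppercase">{sev}</span></h3>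
--             <p class="text-sm text-slate-400 mb-4">{f.get('description', '')}</p>
--             <div class="bg-black/50 p-3 rounded mb-2"><span class="text-xs text-pink-400">POC:</span> <code class="text-sm">{f.get('poc', '')}</code></div>
--             <div class="bg-black/50 p-3 rounded"><span class="text-xs text-emerald-400">FIX:</span> <code class="text-sm">{f.get('fix', '')}</code></div>
--         </div>
--         """
--     return HTML_TEMPLATE.format(c_crit=counts['critical'], c_high=counts['high'], c_med=counts['medium'], c_low=counts['low'], detailed_findings=cards_html)
-- ===== SOURCE B (Python) =====
-- HTML_TEMPLATE = """
-- <!DOCTYPE html>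
-- <html lang="en">
-- <head>
--     <script src="https://cdn.tailwindcss.com"></script>
--     <style>
--         body {{ background-color: #0f172a; color: #cbd5e1; font-family: sans-serif; }}
--         .glass {{ background: rgba(30, 41, 59, 0.7); border: 1px solid rgba(255,255,255,0.1); }}
--         .sev-critical {{ border-left: 4px solid #ef4444; }}
--         .sev-high {{ border-left: 4px solid #f97316; }}
--         .hidden {{ display: none; }}
--     </style>
--     <script>
--         function filterSev(level) {{
--             document.querySelectorAll('.f-card').forEach(c => {{
--                 c.classList.toggle('hidden', level !== 'all' && c.dataset.sev !== level);
--             }});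
--         }}
--     </script>
-- </head>
-- <body class="p-8"><div class="max-w-5xl mx-auto">
--     <h1 class="text-3xl font-bold text-white mb-8">NEXUS <span class="text-blue-500">AUDIT</span></h1>
--
--     <div class="flex gap-2 mb-8">
--         <button onclick="filterSev('all')" class="px-4 py-2 bg-slate-800 text-white rounded">ALL</button>
--         <button onclick="filterSev('critical')" class="px-4 py-2 bg-red-900/50 text-red-400 rounded">CRITICAL</button>
--     </div>
--
--     <div class="grid grid-cols-4 gap-4 mb-8">
--         <div class="glass p-4 rounded text-center"><div class="text-red-500 text-xs">CRITICAL</div><div class="text-2xl font-bold text-white">{c_crit}</div></div>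
--         <div class="glass p-4 rounded text-center"><div class="text-orange-500 text-xs">HIGH</div><div class="text-2xl font-bold text-white">{c_high}</div></div>
--         <div class="glass p-4 rounded text-center"><div class="text-yellow-500 text-xs">MEDIUM</div><div class="text-2xl font-bold text-white">{c_med}</div></div>
--         <div class="glass p-4 rounded text-center"><div class="text-emerald-500 text-xs">LOW</div><div class="text-2xl font-bold text-white">{c_low}</div></div>
--     </div>
--     <div class="space-y-4">{detailed_findings}</div>
-- </div></body></html>
-- """
--
--
-- def map_results_to_html(scan_data):
--     # Single pass over the findings: count and render each finding as we see it,
--     # instead of one counting scan per severity plus a separate card loop.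
--     findings = scan_data.get("findings", [])
--     c_crit = c_high = c_med = c_low = 0
--     cards_html = ""
--     for f in findings:
--         s = f.get('severity', '').lower()
--         if s == 'critical':
--             c_crit += 1
--         elif s == 'high':
--             c_high += 1
--         elif s == 'medium':
--             c_med += 1
--         elif s == 'low':
--             c_low += 1
--         sev = f.get('severity', 'low').lower()
--         cards_html += f"""
--         <div class="f-card glass p-6 rounded sev-{sev} mb-4" data-sev="{sev}">
--             <h3 class="text-lg font-bold text-white mb-2">{f.get('title', 'Unknown')} <span class="text-xs bg-slate-800 p-1 rounded uppercase">{sev}</span></h3>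
--             <p class="text-sm text-slate-400 mb-4">{f.get('description', '')}</p>
--             <div class="bg-black/50 p-3 rounded mb-2"><span class="text-xs text-pink-400">POC:</span> <code class="text-sm">{f.get('poc', '')}</code></div>
--             <div class="bg-black/50 p-3 rounded"><span class="text-xs text-emerald-400">FIX:</span> <code class="text-sm">{f.get('fix', '')}</code></div>
--         </div>
--         """
--     return HTML_TEMPLATE.format(c_crit=c_crit, c_high=c_high, c_med=c_med, c_low=c_low, detailed_findings=cards_html)
-- ===== Notes on version B (the rewrite author's own statement) =====
-- stated objective: alternative
-- what changed: Replaces A's four per-severity counting scans plus a separate card-building loop (five passes over findings) with a single pass that increments the matching counter and appends the card for each finding, preserving the two distinct severity defaults ('' for counting, 'low' for the card).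
import Mathlib
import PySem

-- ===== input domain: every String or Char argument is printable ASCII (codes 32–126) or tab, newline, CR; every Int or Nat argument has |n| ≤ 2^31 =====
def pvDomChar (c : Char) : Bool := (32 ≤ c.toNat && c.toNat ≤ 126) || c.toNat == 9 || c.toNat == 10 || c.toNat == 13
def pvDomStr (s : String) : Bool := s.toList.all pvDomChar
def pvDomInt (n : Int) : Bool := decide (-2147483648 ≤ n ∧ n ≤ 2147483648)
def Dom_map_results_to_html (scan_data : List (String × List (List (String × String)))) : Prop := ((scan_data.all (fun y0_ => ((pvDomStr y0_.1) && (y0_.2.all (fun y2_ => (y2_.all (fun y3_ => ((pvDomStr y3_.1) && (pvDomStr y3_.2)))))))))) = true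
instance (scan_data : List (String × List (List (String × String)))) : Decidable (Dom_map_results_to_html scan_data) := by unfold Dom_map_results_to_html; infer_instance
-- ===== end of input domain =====

-- ===== PORT A =====
-- B builds the page in a single pass over the findings instead of A's four counting scans plus a separate card loop (objective: alternative decomposition; same return value).
def pvT0 : String := "\n<!DOCTYPE html>\n<html lang=\"en\">\n<head>\n    <script src=\"https://cdn.tailwindcss.com\"></script>\n    <style>\n        body { background-color: #0f172a; color: #cbd5e1; font-family: sans-serif; }\n        .glass { background: rgba(30, 41, 59, 0.7); border: 1px solid rgba(255,255,255,0.1); }\n        .sev-critical { border-left: 4px solid #ef4444; }\n        .sev-high { border-left: 4px solid #f97316; }\n        .hidden { display: none; }\n    </style>\n    <script>\n        function filterSev(level) {\n            document.querySelectorAll('.f-card').forEach(c => {\n                c.classList.toggle('hidden', level !== 'all' && c.dataset.sev !== level);\n            });\n        }\n    </script>\n</head>\n<body class=\"p-8\"><div class=\"max-w-5xl mx-auto\">\n    <h1 class=\"text-3xl font-bold text-white mb-8\">NEXUS <span class=\"text-blue-500\">AUDIT</span></h1>\n    \n    <div class=\"flex gap-2 mb-8\">\n        <button onclick=\"filterSev('all')\"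 class=\"px-4 py-2 bg-slate-800 text-white rounded\">ALL</button>\n        <button onclick=\"filterSev('critical')\" class=\"px-4 py-2 bg-red-900/50 text-red-400 rounded\">CRITICAL</button>\n    </div>\n\n    <div class=\"grid grid-cols-4 gap-4 mb-8\">\n        <div class=\"glass p-4 rounded text-center\"><div class=\"text-red-500 text-xs\">CRITICAL</div><div class=\"text-2xl font-bold text-white\">"
def pvT1 : String := "</div></div>\n        <div class=\"glass p-4 rounded text-center\"><div class=\"text-orange-500 text-xs\">HIGH</div><div class=\"text-2xl font-bold text-white\">"
def pvT2 : String := "</div></div>\n        <div class=\"glass p-4 rounded text-center\"><div class=\"text-yellow-500 text-xs\">MEDIUM</div><div class=\"text-2xl font-bold text-white\">"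
def pvT3 : String := "</div></div>\n        <div class=\"glass p-4 rounded text-center\"><div class=\"text-emerald-500 text-xs\">LOW</div><div class=\"text-2xl font-bold text-white\">"
def pvT4 : String := "</div></div>\n    </div>\n    <div class=\"space-y-4\">"
def pvT5 : String := "</div>\n</div></body></html>\n"
def pvC0 : String := "\n        <div class=\"f-card glass p-6 rounded sev-"
def pvC1 : String := " mb-4\" data-sev=\""
def pvC2 : String := "\">\n            <h3 class=\"text-lg font-bold text-white mb-2\">"
def pvC3 : String := " <span class=\"text-xs bg-slate-800 p-1 rounded uppercase\">"
def pvC4 : String := "</span></h3>\n            <p class=\"text-sm text-slate-400 mb-4\">"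
def pvC5 : String := "</p>\n            <div class=\"bg-black/50 p-3 rounded mb-2\"><span class=\"text-xs text-pink-400\">POC:</span> <code class=\"text-sm\">"
def pvC6 : String := "</code></div>\n            <div class=\"bg-black/50 p-3 rounded\"><span class=\"text-xs text-emerald-400\">FIX:</span> <code class=\"text-sm\">"
def pvC7 : String := "</code></div>\n        </div>\n        "

-- f.get(k, d): first-match lookup in the finding's association list (Python dict.get)
def pyGetD (f : List (String × String)) (k d : String) : String :=
  (PySem.Dict.mk f).getD k d

-- the card f-string (identical text in A and in B)
def cardHtml (f : List (String × String)) : String :=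
  let sev := PySem.Str.lower (pyGetD f "severity" "low")
  pvC0 ++ sev ++ pvC1 ++ sev ++ pvC2 ++ pyGetD f "title" "Unknown" ++ pvC3 ++ sev ++ pvC4 ++
    pyGetD f "description" "" ++ pvC5 ++ pyGetD f "poc" "" ++ pvC6 ++ pyGetD f "fix" "" ++ pvC7

-- A: counts = {s: sum(1 for f in findings if f.get('severity','').lower() == s) for s in [...]}
def sevSum (findings : List (List (String × String))) (s : String) : Int :=
  findings.foldl (fun n f => if PySem.Str.lower (pyGetD f "severity" "") == s then n + 1 else n) 0

def map_results_to_html (scan_data : List (String × List (List (String × String)))) : String :=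
  let findings := (PySem.Dict.mk scan_data).getD "findings" []
  let counts : PySem.Dict String Int :=
    PySem.Dict.mk [("critical", sevSum findings "critical"), ("high", sevSum findings "high"),
                   ("medium", sevSum findings "medium"), ("low", sevSum findings "low")]
  let cards_html := findings.foldl (fun acc f => acc ++ cardHtml f) ""
  pvT0 ++ PySem.Int.toStr (counts.getD "critical" 0) ++ pvT1 ++ PySem.Int.toStr (counts.getD "high" 0) ++
    pvT2 ++ PySem.Int.toStr (counts.getD "medium" 0) ++ pvT3 ++ PySem.Int.toStr (counts.getD "low" 0) ++
    pvT4 ++ cards_html ++ pvT5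

-- ===== PORT B =====
-- B's loop body: bump the matching counter (count-severity defaults to '') and append the card
def bStep (st : Int × Int × Int × Int × String) (f : List (String × String)) :
    Int × Int × Int × Int × String :=
  let (c, h, m, l, cards) := st
  let s := PySem.Str.lower (pyGetD f "severity" "")
  let (c, h, m, l) :=
    if s == "critical" then (c + 1, h, m, l)
    else if s == "high" then (c, h + 1, m, l)
    else if s == "medium" then (c, h, m + 1, l)
    else if s == "low" then (c, h, m, l + 1)
    else (c, h, m, l)
  (c, h, m, l, cards ++ cardHtml f)

def map_results_to_html_alt (scan_data : List (String × List (List (String × String)))) : String :=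
  let findings := (PySem.Dict.mk scan_data).getD "findings" []
  let r := findings.foldl bStep (0, 0, 0, 0, "")
  pvT0 ++ PySem.Int.toStr r.1 ++ pvT1 ++ PySem.Int.toStr r.2.1 ++
    pvT2 ++ PySem.Int.toStr r.2.2.1 ++ pvT3 ++ PySem.Int.toStr r.2.2.2.1 ++
    pvT4 ++ r.2.2.2.2 ++ pvT5

-- ===== PRECONDITION & SPEC =====
def Spec_map_results_to_html (scan_data : List (String × List (List (String × String)))) (out : String) : Prop := out = map_results_to_html_alt scan_data
instance (scan_data : List (String × List (List (String × String)))) (out : String) : Decidable (Spec_map_results_to_html scan_data out) := by unfold Spec_map_results_to_html; infer_instance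

-- ===== CLAIM (what is proved, stated in full; the proofs are below) =====
def Claim_equal_map_results_to_html : Prop := ∀ (scan_data : List (String × List (List (String × String)))), Dom_map_results_to_html scan_data → Spec_map_results_to_html scan_data (map_results_to_html scan_data)

-- ===== LEMMAS AND PROOFS =====
theorem foldl_count_from (cond : List (String × String) → Bool)
    (fs : List (List (String × String))) (n : Int) :
    fs.foldl (fun n f => if cond f then n + 1 else n) n
      = n + fs.foldl (fun n f => if cond f then n + 1 else n) 0 := by
  induction fs generalizing n with
  | nil => simp
  | cons f fs ih =>
    simp only [List.foldl_cons]
    rw [ih (if cond f then n + 1 else n), ih (if cond f then (0 : Int) + 1 else 0)]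
    by_cases hc : cond f
    · simp [hc]
      omega
    · simp [hc]

theorem sevSum_cons (f : List (String × String)) (fs : List (List (String × String))) (s : String) :
    sevSum (f :: fs) s
      = (if PySem.Str.lower (pyGetD f "severity" "") == s then 1 else 0) + sevSum fs s := by
  simp only [sevSum, List.foldl_cons]
  rw [foldl_count_from]
  by_cases hc : (PySem.Str.lower (pyGetD f "severity" "") == s) = true <;> simp [hc]

theorem bStep_foldl (fs : List (List (String × String))) (c h m l : Int) (cards : String) :
    fs.foldl bStep (c, h, m, l, cards)
      = (c + sevSum fs "critical", h + sevSum fs "high", m + sevSum fs "medium",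
         l + sevSum fs "low", fs.foldl (fun acc f => acc ++ cardHtml f) cards) := by
  induction fs generalizing c h m l cards with
  | nil => simp [sevSum]
  | cons f fs ih =>
    simp only [List.foldl_cons]
    by_cases h1 : (PySem.Str.lower (pyGetD f "severity" "") == "critical") = true
    · have e := eq_of_beq h1
      rw [show bStep (c, h, m, l, cards) f = (c + 1, h, m, l, cards ++ cardHtml f) by
            simp [bStep, h1]]
      rw [ih]
      simp [sevSum_cons, e]
      omega
    · by_cases h2 : (PySem.Str.lower (pyGetD f "severity" "") == "high") = true
      · have e := eq_of_beq h2
        rw [show bStep (c, h, m, l, cards) f = (c, h + 1, m, l, cards ++ cardHtml f) by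
              simp [bStep, h1, h2]]
        rw [ih]
        simp [sevSum_cons, e]
        omega
      · by_cases h3 : (PySem.Str.lower (pyGetD f "severity" "") == "medium") = true
        · have e := eq_of_beq h3
          rw [show bStep (c, h, m, l, cards) f = (c, h, m + 1, l, cards ++ cardHtml f) by
                simp [bStep, h1, h2, h3]]
          rw [ih]
          simp [sevSum_cons, e]
          omega
        · by_cases h4 : (PySem.Str.lower (pyGetD f "severity" "") == "low") = true
          · have e := eq_of_beq h4
            rw [show bStep (c, h, m, l, cards) f = (c, h, m, l + 1, cards ++ cardHtml f) by
                  simp [bStep, h1, h2, h3, h4]]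
            rw [ih]
            simp [sevSum_cons, e]
            omega
          · rw [show bStep (c, h, m, l, cards) f = (c, h, m, l, cards ++ cardHtml f) by
                  simp [bStep, h1, h2, h3, h4]]
            rw [ih]
            simp [sevSum_cons, h1, h2, h3, h4]

-- ===== VERDICT (by name: the statement is the Claim_ definition above) =====
theorem map_results_to_html_spec : Claim_equal_map_results_to_html := by
  intro scan_data _
  unfold Spec_map_results_to_html map_results_to_html map_results_to_html_alt
  simp only []
  rw [bStep_foldl]
  simp [PySem.Dict.getD, PySem.Dict.get?_mk_cons]
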